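-- pv_equiv track=rewrite | github.com/PYJSCoding/Python-Problems | Hamster.py | hamster_me
-- ===== SOURCE A (Python) =====
-- def hamster_me(code, message):
--     sortCode = sorted(list(set(code)))
--     Start = sortCode[0]
--     ans = []
--     result = []
--     # Array
--     while True:
--         List = []
--         try:
--             for character in map(chr, range(ord(sortCode[0]),ord(sortCode[1]))):
--                List.append(character)
--             ans.append(List)
--             sortCode.pop(0)
--         except:
--             for character in map(chr, range(ord(sortCode[0]),123)):
--                List.append(character)
--             for character in map(chr, range(97,ord(Start))):
--                List.append(character)
--             ans.append(List)
--             break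
--     # Coding
--     for letter in message:
--         for column in ans:
--             if column[0] == letter:
--                 Tuple = (letter,'1')
--                 result.append(Tuple)
--             else:
--                 for item in column:
--                     if item == letter:
--                         Tuple = (column[0],str(column.index(item)+1))
--                         result.append(Tuple)
--     Ans =  ''.join([i for sub in result for i in sub])
--     return Ans
-- ===== SOURCE B (Python) =====
-- def hamster_me(code, message):
--     # precompute the piece for every ASCII ordinal once, then a single dict lookup per letter
--     sc = sorted(set(code))
--     lo, hi = ord(sc[0]), ord(sc[-1])  # IndexError on empty code, like the original
--     enc = {}
--     for o in range(128):
--         if lo <= o < hi: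
--             head = max(c for c in sc if ord(c) <= o)
--             enc[chr(o)] = head + str(o - ord(head) + 1)
--         elif hi <= o <= 122:
--             enc[chr(o)] = sc[-1] + str(o - hi + 1)
--         elif 97 <= o < lo:
--             if hi <= 122:
--                 enc[chr(o)] = sc[-1] + str(123 - hi + o - 97 + 1)
--             else:
--                 enc[chr(o)] = 'a' + str(o - 96)
--         else:
--             enc[chr(o)] = ''
--     return ''.join(enc.get(ch, '') for ch in message)
-- ===== Notes on version B (the rewrite author's own statement) =====
-- stated objective: faster
-- what changed: B replaces A's materialised alphabet-column lists and per-letter nested column/item scans (with repeated list.index) by a 128-entry table precomputed once from a closed form (greatest code char <= the ordinal plus an arithmetic position), so encoding is one dict lookup per message character.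
import Mathlib
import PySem

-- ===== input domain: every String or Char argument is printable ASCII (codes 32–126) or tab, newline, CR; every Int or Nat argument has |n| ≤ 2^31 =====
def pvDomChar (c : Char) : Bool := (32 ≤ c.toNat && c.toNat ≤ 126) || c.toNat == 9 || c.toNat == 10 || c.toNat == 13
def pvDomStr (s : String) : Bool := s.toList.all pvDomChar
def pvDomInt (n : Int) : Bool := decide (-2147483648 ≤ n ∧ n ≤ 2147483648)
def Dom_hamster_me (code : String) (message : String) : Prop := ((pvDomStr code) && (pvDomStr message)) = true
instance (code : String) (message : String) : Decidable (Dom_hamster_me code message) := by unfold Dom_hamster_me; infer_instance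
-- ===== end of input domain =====

-- B replaces A's materialised alphabet columns and per-letter nested scans by a 128-entry
-- table precomputed from a closed form (greatest code char ≤ ordinal + arithmetic position),
-- one dict lookup per message character (measured faster); equivalence proved on Pre_.

-- ===== PORT A =====

-- chr(n): exact for the code points used here (all < 127)
def pvChr (n : Int) : Char := Char.ofNat n.toNat

-- map(chr, range(a, b))
def pvRngC (a b : Int) : List Char := (PySem.List.pyRange a b 1).map pvChr

-- the while-loop building `ans`: pops the head while two elements remain,
-- then the final (wrap-around) column; structural recursion on sortCode
def pvBuildCols (start : Char) : List Char → List (List Char)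
  | [] => []
  | [c] => [pvRngC c.toNat 123 ++ pvRngC 97 start.toNat]
  | c :: d :: rest => pvRngC c.toNat d.toNat :: pvBuildCols start (d :: rest)

-- the body of `for column in ans:` for one letter; a Python pair of strings
-- (letter, digits) is carried as Char × List Char
def pvColCode (letter : Char) (column : List Char) : List (Char × List Char) :=
  match column with
  | [] => []   -- Python raises IndexError on column[0] here (outside Pre_)
  | h :: _ =>
    if h == letter then [(letter, ['1'])]
    else column.foldl (fun acc item =>
      if item == letter then
        acc ++ [(h, PySem.Int.toChars (((PySem.List.index? column item).getD 0 : Nat) + 1))]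
      else acc) []

def hamster_me (code : String) (message : String) : String :=
  let sortCode := PySem.List.sorted (PySem.Set.ofList code.toList) (fun c => c) false
  match sortCode with
  | [] => ""   -- Python raises IndexError on sortCode[0] (outside Pre_)
  | c0 :: rest =>
    let ans := pvBuildCols c0 (c0 :: rest)
    let result := message.toList.foldl
      (fun r letter => ans.foldl (fun r column => r ++ pvColCode letter column) r) []
    String.ofList (result.flatMap (fun t => t.1 :: t.2))

-- ===== PORT B =====

-- the piece stored for one ASCII ordinal o (the body of Source B's table-building loop;
-- '' for a letter no column holds)
def pvEncodeO (sc : List Char) (lo hi : Char) (o : Int) : List Char :=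
  if (lo.toNat : Int) ≤ o ∧ o < (hi.toNat : Int) then
    match PySem.List.max? (sc.filter (fun c => (c.toNat : Int) ≤ o)) (fun c => c) with
    | none => []   -- unreachable: lo itself passes the filter
    | some head => head :: PySem.Int.toChars (o - head.toNat + 1)
  else if (hi.toNat : Int) ≤ o ∧ o ≤ 122 then
    hi :: PySem.Int.toChars (o - hi.toNat + 1)
  else if 97 ≤ o ∧ o < (lo.toNat : Int) then
    if hi.toNat ≤ 122 then hi :: PySem.Int.toChars (123 - (hi.toNat : Int) + o - 97 + 1)
    else Char.ofNat 97 :: PySem.Int.toChars (o - 96)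
  else []

def hamster_me_alt (code : String) (message : String) : String :=
  let sc := PySem.List.sorted (PySem.Set.ofList code.toList) (fun c => c) false
  match sc with
  | [] => ""   -- Python raises IndexError on sc[0] (outside Pre_)
  | c0 :: rest =>
    let hi := (c0 :: rest).getLast (by simp)
    let enc := (PySem.List.pyRange 0 128 1).foldl
      (fun d o => PySem.Dict.insert d (pvChr o) (pvEncodeO (c0 :: rest) c0 hi o))
      (PySem.Dict.empty)
    String.ofList (message.toList.flatMap (fun ch => PySem.Dict.getD enc ch []))

-- ===== PRECONDITION & SPEC =====
-- Pre_ excludes exactly the inputs where A raises IndexError: empty code, and a nonempty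
-- message with a code containing both a char above 'z' and a char at or below 'a'
-- (then A's wrap-around column is empty and column[0] raises).
def Pre_hamster_me (code : String) (message : String) : Prop :=
  code.toList ≠ [] ∧
    (message.toList = [] ∨ code.toList.all (fun c => c.toNat ≤ 122) = true ∨
      code.toList.all (fun c => 97 < c.toNat) = true)
instance (code : String) (message : String) : Decidable (Pre_hamster_me code message) := by
  unfold Pre_hamster_me; infer_instance

def pvWitness_hamster_me : String × String := ("bca", "hello world!")

def Spec_hamster_me (code : String) (message : String) (out : String) : Prop := out = hamster_me_alt code message
instance (code : String) (message : String) (out : String) : Decidable (Spec_hamster_me code message out) := by unfold Spec_hamster_me; infer_instance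

-- ===== CLAIM (what is proved, stated in full; the proofs are below) =====
def Claim_equal_hamster_me : Prop := ∀ (code : String) (message : String), Dom_hamster_me code message → Pre_hamster_me code message → Spec_hamster_me code message (hamster_me code message)
-- ===== LEMMAS AND PROOFS =====

-- flatten of one Python (letter, digits) pair
def pvPf (t : Char × List Char) : List Char := t.1 :: t.2

-- A's per-column output for one letter, flattened to chars
def pvColChars (letter : Char) (column : List Char) : List Char :=
  (pvColCode letter column).flatMap pvPf

-- chr/ord facts on the sub-surrogate range used here
theorem pvToNat_ofNat (n : Nat) (h : n < 55296) : (Char.ofNat n).toNat = n := by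
  unfold Char.ofNat
  split
  · rfl
  · omega

theorem pvChr_toNat_eval (n : Int) (h0 : 0 ≤ n) (h : n < 55296) : ((pvChr n).toNat : Int) = n := by
  unfold pvChr
  rw [pvToNat_ofNat _ (by omega)]
  omega

theorem pvChr_toNat (c : Char) : pvChr (c.toNat : Int) = c := by
  unfold pvChr
  simp [Char.ofNat_toNat]

theorem pvRngC_cons (a b : Int) (h : a < b) : pvRngC a b = pvChr a :: pvRngC (a + 1) b := by
  unfold pvRngC
  rw [PySem.List.pyRange_one_cons h]
  rfl

theorem pvRngC_nil (a b : Int) (h : b ≤ a) : pvRngC a b = [] := by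
  unfold pvRngC
  rw [PySem.List.pyRange_one_eq_nil h]
  rfl

theorem mem_pvRngC (a b : Int) (c : Char) (h0 : 0 ≤ a) (h1 : b ≤ 127) :
    c ∈ pvRngC a b ↔ a ≤ (c.toNat : Int) ∧ (c.toNat : Int) < b := by
  unfold pvRngC
  simp only [List.mem_map, PySem.List.mem_pyRange_one]
  constructor
  · rintro ⟨n, ⟨hn1, hn2⟩, rfl⟩
    rw [pvChr_toNat_eval n (by omega) (by omega)]
    exact ⟨hn1, hn2⟩
  · intro ⟨h2, h3⟩
    exact ⟨(c.toNat : Int), ⟨h2, h3⟩, pvChr_toNat c⟩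

theorem nodup_pvRngC (a b : Int) (h0 : 0 ≤ a) (h1 : b ≤ 127) : (pvRngC a b).Nodup := by
  unfold pvRngC
  refine List.Nodup.map_on ?_ (PySem.List.nodup_pyRange_one a b)
  intro x hx y hy hxy
  rw [PySem.List.mem_pyRange_one] at hx hy
  have ex : ((pvChr x).toNat : Int) = x := pvChr_toNat_eval x (by omega) (by omega)
  have ey : ((pvChr y).toNat : Int) = y := pvChr_toNat_eval y (by omega) (by omega)
  rw [hxy] at ex
  omega

theorem pvIndex?_append_of_not_mem {α : Type} [BEq α] [LawfulBEq α] (l t : List α) (v : α)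
    (h : v ∉ l) : PySem.List.index? (l ++ t) v = (PySem.List.index? t v).map (· + l.length) := by
  induction l with
  | nil => simp
  | cons x xs ih =>
    have hx : x ≠ v := fun he => h (he ▸ List.mem_cons_self)
    rw [List.cons_append, PySem.List.index?_cons_of_ne _ hx, ih (fun hm => h (List.mem_cons_of_mem _ hm))]
    cases PySem.List.index? t v <;> simp; omega

theorem pvIndex?_rngC (a b : Int) (c : Char) (h0 : 0 ≤ a) (h1 : b ≤ 127)
    (ha : a ≤ (c.toNat : Int)) (hb : (c.toNat : Int) < b) :
    PySem.List.index? (pvRngC a b) c = some ((c.toNat : Int) - a).toNat := by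
  have hsplit : pvRngC a b = pvRngC a c.toNat ++ pvRngC c.toNat b := by
    unfold pvRngC
    rw [PySem.List.pyRange_one_append a c.toNat b ha (by omega), List.map_append]
  rw [hsplit, pvIndex?_append_of_not_mem]
  · rw [pvRngC_cons _ _ hb, pvChr_toNat, PySem.List.index?_cons_self]
    unfold pvRngC
    simp [PySem.List.length_pyRange_one]
  · rw [mem_pvRngC _ _ _ h0 (by omega)]
    omega

-- filter by == on a Nodup list keeps at most the one occurrence
theorem pvFilter_nodup (l : List Char) (v : Char) (h : l.Nodup) :
    l.filter (fun x => x == v) = if v ∈ l then [v] else [] := by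
  induction l with
  | nil => simp
  | cons x xs ih =>
    rw [List.nodup_cons] at h
    by_cases hx : x = v
    · subst hx
      simp [ih h.2, h.1]
    · simp only [List.filter_cons, beq_iff_eq, hx, if_false, ih h.2, List.mem_cons]
      simp [Ne.symm hx]

-- A's per-column contribution, characterised (head ≠ letter case)
theorem pvColChars_spec (h : Char) (t : List Char) (letter : Char)
    (hne : h ≠ letter) (hnd : (h :: t).Nodup) :
    pvColChars letter (h :: t) =
      if letter ∈ h :: t then
        h :: PySem.Int.toChars (((PySem.List.index? (h :: t) letter).getD 0 : Nat) + 1)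
      else [] := by
  have hbeq : (h == letter) = false := by simp [hne]
  unfold pvColChars
  simp only [pvColCode, hbeq, Bool.false_eq_true, if_false]
  rw [PySem.List.foldl_append_if (p := fun item => item == letter)
    (f := fun item => (h, PySem.Int.toChars (((PySem.List.index? (h :: t) item).getD 0 : Nat) + 1)))]
  rw [pvFilter_nodup _ _ hnd]
  split
  · simp [pvPf]
  · simp

theorem pvCharLt (a b : Char) : a < b ↔ a.toNat < b.toNat := by
  simp [Char.lt_def, UInt32.lt_iff_toNat_lt]

theorem pvToChars_one : PySem.Int.toChars 1 = ['1'] := by decide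

-- contribution of an interior column [c, d)
theorem pvColChars_rng (c d letter : Char) (h1 : d.toNat ≤ 127) (hcd : c.toNat < d.toNat) :
    pvColChars letter (pvRngC c.toNat d.toNat) =
      if c.toNat ≤ letter.toNat ∧ letter.toNat < d.toNat then
        c :: PySem.Int.toChars ((letter.toNat : Int) - c.toNat + 1)
      else [] := by
  have e : pvRngC c.toNat d.toNat = c :: pvRngC ((c.toNat : Int) + 1) d.toNat := by
    rw [pvRngC_cons _ _ (by exact_mod_cast hcd), pvChr_toNat]
  by_cases hl : c = letter
  · subst hl
    rw [e]
    unfold pvColChars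
    simp only [pvColCode, beq_self_eq_true, if_true]
    rw [if_pos (show c.toNat ≤ c.toNat ∧ c.toNat < d.toNat from ⟨le_rfl, hcd⟩)]
    have h2 : (c.toNat : Int) - c.toNat + 1 = 1 := by omega
    rw [h2, pvToChars_one]
    simp [pvPf]
  · rw [e, pvColChars_spec c _ letter hl (e ▸ nodup_pvRngC c.toNat d.toNat (by positivity) (by exact_mod_cast h1))]
    rw [← e]
    by_cases hmem : c.toNat ≤ letter.toNat ∧ letter.toNat < d.toNat
    · have hmI : ((c.toNat : Int) ≤ (letter.toNat : Int)) ∧ ((letter.toNat : Int) < (d.toNat : Int)) := by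
        exact_mod_cast hmem
      have hm : letter ∈ pvRngC (c.toNat : Int) (d.toNat : Int) :=
        (mem_pvRngC _ _ _ (by positivity) (by exact_mod_cast h1)).mpr hmI
      rw [if_pos hm, if_pos hmem,
        pvIndex?_rngC _ _ _ (by positivity) (by exact_mod_cast h1) hmI.1 hmI.2, Option.getD_some]
      have h3 : ((((letter.toNat : Int) - c.toNat).toNat : Nat) : Int) + 1 = (letter.toNat : Int) - c.toNat + 1 := by
        omega
      rw [h3]
    · have hm : letter ∉ pvRngC (c.toNat : Int) (d.toNat : Int) := by
        rw [mem_pvRngC _ _ _ (by positivity) (by exact_mod_cast h1)]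
        omega
      rw [if_neg hm, if_neg hmem]

theorem pvRngC_length (a b : Int) : (pvRngC a b).length = (b - a).toNat := by
  unfold pvRngC
  simp [PySem.List.length_pyRange_one]

theorem pvNodup_append_rng (a b c d : Int) (h0 : 0 ≤ a) (h1 : b ≤ 127) (h2 : 0 ≤ c) (h3 : d ≤ 127)
    (hdisj : d ≤ a ∨ b ≤ c) : (pvRngC a b ++ pvRngC c d).Nodup := by
  refine List.Nodup.append (nodup_pvRngC a b h0 h1) (nodup_pvRngC c d h2 h3) ?_
  intro x hx hy
  rw [mem_pvRngC _ _ _ h0 h1] at hx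
  rw [mem_pvRngC _ _ _ h2 h3] at hy
  omega

-- contribution of the final (wrap-around) column
theorem pvColChars_last (start hi letter : Char) (hs : start.toNat ≤ 127) (hh : hi.toNat ≤ 126)
    (hsh : start.toNat ≤ hi.toNat) :
    pvColChars letter (pvRngC hi.toNat 123 ++ pvRngC 97 start.toNat) =
      if hi.toNat ≤ letter.toNat ∧ letter.toNat ≤ 122 then
        hi :: PySem.Int.toChars ((letter.toNat : Int) - hi.toNat + 1)
      else if 97 ≤ letter.toNat ∧ letter.toNat < start.toNat then
        (if hi.toNat ≤ 122 then
          hi :: PySem.Int.toChars (123 - (hi.toNat : Int) + letter.toNat - 97 + 1)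
        else Char.ofNat 97 :: PySem.Int.toChars ((letter.toNat : Int) - 96))
      else [] := by
  by_cases hile : hi.toNat ≤ 122
  · have e : pvRngC hi.toNat 123 = hi :: pvRngC ((hi.toNat : Int) + 1) 123 := by
      rw [pvRngC_cons _ _ (by exact_mod_cast Nat.lt_succ_of_le hile), pvChr_toNat]
    have hnd : (pvRngC (hi.toNat : Int) 123 ++ pvRngC 97 start.toNat).Nodup :=
      pvNodup_append_rng _ _ _ _ (by positivity) (by norm_num) (by norm_num)
        (by exact_mod_cast hs) (Or.inl (by exact_mod_cast hsh))
    by_cases hl : hi = letter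
    · subst hl
      rw [e, List.cons_append]
      unfold pvColChars
      simp only [pvColCode, beq_self_eq_true, if_true]
      rw [if_pos ⟨le_rfl, hile⟩]
      have h2 : (hi.toNat : Int) - hi.toNat + 1 = 1 := by omega
      rw [h2, pvToChars_one]
      simp [pvPf]
    · have e2 : pvRngC (hi.toNat : Int) 123 ++ pvRngC 97 start.toNat =
          hi :: (pvRngC ((hi.toNat : Int) + 1) 123 ++ pvRngC 97 start.toNat) := by
        rw [e, List.cons_append]
      rw [e2, pvColChars_spec hi _ letter hl (e2 ▸ hnd), ← e2]
      have hmemiff : letter ∈ pvRngC (hi.toNat : Int) 123 ++ pvRngC 97 start.toNat ↔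
          ((hi.toNat ≤ letter.toNat ∧ letter.toNat < 123) ∨ (97 ≤ letter.toNat ∧ letter.toNat < start.toNat)) := by
        rw [List.mem_append, mem_pvRngC _ _ _ (by positivity) (by norm_num),
          mem_pvRngC _ _ _ (by norm_num) (by exact_mod_cast hs)]
        omega
      by_cases hm1 : hi.toNat ≤ letter.toNat ∧ letter.toNat < 123
      · rw [if_pos (hmemiff.mpr (Or.inl hm1)), if_pos (by omega : hi.toNat ≤ letter.toNat ∧ letter.toNat ≤ 122)]
        have hmI : ((hi.toNat : Int) ≤ (letter.toNat : Int)) ∧ ((letter.toNat : Int) < 123) := by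
          exact_mod_cast hm1
        rw [PySem.List.index?_append_of_mem _
            ((mem_pvRngC _ _ _ (by positivity) (by norm_num)).mpr hmI),
          pvIndex?_rngC _ _ _ (by positivity) (by norm_num) hmI.1 hmI.2, Option.getD_some]
        have h3 : ((((letter.toNat : Int) - hi.toNat).toNat : Nat) : Int) + 1 = (letter.toNat : Int) - hi.toNat + 1 := by omega
        rw [h3]
      · by_cases hm2 : 97 ≤ letter.toNat ∧ letter.toNat < start.toNat
        · rw [if_pos (hmemiff.mpr (Or.inr hm2)), if_neg (by omega), if_pos hm2, if_pos hile]
          have hmI : ((97 : Int) ≤ (letter.toNat : Int)) ∧ ((letter.toNat : Int) < (start.toNat : Int)) := by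
            exact_mod_cast hm2
          have hnm : letter ∉ pvRngC (hi.toNat : Int) 123 := by
            rw [mem_pvRngC (hi.toNat : Int) 123 letter (by positivity) (by norm_num)]
            omega
          rw [pvIndex?_append_of_not_mem _ _ _ hnm,
            pvIndex?_rngC _ _ _ (by norm_num) (by exact_mod_cast hs) hmI.1 hmI.2]
          simp only [Option.map_some, Option.getD_some, pvRngC_length]
          have h3 : ((((letter.toNat : Int) - 97).toNat + ((123 : Int) - hi.toNat).toNat : Nat) : Int) + 1 =
              123 - (hi.toNat : Int) + letter.toNat - 97 + 1 := by omega
          rw [h3]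
        · rw [if_neg (by rw [hmemiff]; omega), if_neg (by omega), if_neg hm2]
  · have e0 : pvRngC (hi.toNat : Int) 123 = [] := pvRngC_nil _ _ (by exact_mod_cast (show (123:Nat) ≤ hi.toNat by omega))
    rw [e0, List.nil_append]
    by_cases hst : 97 < start.toNat
    · have e : pvRngC 97 start.toNat = Char.ofNat 97 :: pvRngC ((97 : Int) + 1) start.toNat := by
        rw [pvRngC_cons _ _ (by exact_mod_cast hst)]
        rfl
      by_cases hl : Char.ofNat 97 = letter
      · subst hl
        rw [e]
        unfold pvColChars
        simp only [pvColCode, beq_self_eq_true, if_true]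
        have h97 : (Char.ofNat 97).toNat = 97 := by decide
        rw [if_neg (by omega), if_pos (by omega), if_neg (by omega)]
        have h2 : ((Char.ofNat 97).toNat : Int) - 96 = 1 := by rw [h97]; norm_num
        rw [h2, pvToChars_one]
        simp [pvPf]
      · rw [e, pvColChars_spec _ _ letter hl (e ▸ nodup_pvRngC 97 start.toNat (by norm_num) (by exact_mod_cast hs)), ← e]
        by_cases hm2 : 97 ≤ letter.toNat ∧ letter.toNat < start.toNat
        · have hmI : ((97 : Int) ≤ (letter.toNat : Int)) ∧ ((letter.toNat : Int) < (start.toNat : Int)) := by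
            exact_mod_cast hm2
          rw [if_pos ((mem_pvRngC _ _ _ (by norm_num) (by exact_mod_cast hs)).mpr hmI),
            pvIndex?_rngC _ _ _ (by norm_num) (by exact_mod_cast hs) hmI.1 hmI.2, Option.getD_some,
            if_neg (by omega), if_pos hm2, if_neg (by omega)]
          have h3 : ((((letter.toNat : Int) - 97).toNat : Nat) : Int) + 1 = (letter.toNat : Int) - 96 := by omega
          rw [h3]
        · rw [if_neg (by rw [mem_pvRngC _ _ _ (by norm_num) (by exact_mod_cast hs)]; omega),
            if_neg (by omega), if_neg hm2]
    · rw [pvRngC_nil _ _ (by exact_mod_cast (show start.toNat ≤ (97:Nat) by omega))]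
      rw [if_neg (by omega), if_neg (by omega)]
      rfl

def pvInterior (sc : List Char) (letter : Char) : List Char :=
  match PySem.List.max? (sc.filter (fun c => c.toNat ≤ letter.toNat)) (fun c => c) with
  | none => []
  | some head => head :: PySem.Int.toChars ((letter.toNat : Int) - head.toNat + 1)

-- the per-letter closed form (what one table entry holds for letter's ordinal)
def pvEncodeC (sc : List Char) (lo hi : Char) (letter : Char) : List Char :=
  if lo.toNat ≤ letter.toNat ∧ letter.toNat < hi.toNat then
    match PySem.List.max? (sc.filter (fun c => c.toNat ≤ letter.toNat)) (fun c => c) with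
    | none => []
    | some head => head :: PySem.Int.toChars ((letter.toNat : Int) - head.toNat + 1)
  else if hi.toNat ≤ letter.toNat ∧ letter.toNat ≤ 122 then
    hi :: PySem.Int.toChars ((letter.toNat : Int) - hi.toNat + 1)
  else if 97 ≤ letter.toNat ∧ letter.toNat < lo.toNat then
    if hi.toNat ≤ 122 then hi :: PySem.Int.toChars (123 - (hi.toNat : Int) + letter.toNat - 97 + 1)
    else Char.ofNat 97 :: PySem.Int.toChars ((letter.toNat : Int) - 96)
  else []

theorem pvInterior_here (c : Char) (tail : List Char) (letter : Char)
    (hc : c.toNat ≤ letter.toNat) (htail : ∀ x ∈ tail, letter.toNat < x.toNat) :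
    pvInterior (c :: tail) letter = c :: PySem.Int.toChars ((letter.toNat : Int) - c.toNat + 1) := by
  unfold pvInterior
  have hf : (c :: tail).filter (fun x => x.toNat ≤ letter.toNat) = [c] := by
    rw [List.filter_cons, if_pos (by simpa using hc), List.filter_eq_nil_iff.mpr]
    intro x hx
    simpa using Nat.not_le.mpr (htail x hx)
  rw [hf, PySem.List.max?_id_cons]
  rfl

theorem pvInterior_skip (c d : Char) (tail : List Char) (letter : Char)
    (hp : (c :: d :: tail).Pairwise (· < ·)) (hd : d.toNat ≤ letter.toNat) :
    pvInterior (c :: d :: tail) letter = pvInterior (d :: tail) letter := by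
  have hcd : c < d := (List.pairwise_cons.mp hp).1 d List.mem_cons_self
  have hc : c.toNat ≤ letter.toNat := le_trans (le_of_lt ((pvCharLt c d).mp hcd)) hd
  unfold pvInterior
  rw [List.filter_cons, if_pos (by simpa using hc), List.filter_cons, if_pos (by simpa using hd)]
  rw [PySem.List.max?_id_cons, PySem.List.max?_id_cons, List.foldl_cons,
    max_eq_right (le_of_lt hcd)]

theorem pvG (rest : List Char) : ∀ (c start letter L : Char),
    (c :: rest).Pairwise (· < ·) →
    (∀ x ∈ c :: rest, x.toNat ≤ 126) →
    start.toNat ≤ c.toNat → start.toNat ≤ 127 →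
    (c :: rest).getLast (by simp) = L →
    (pvBuildCols start (c :: rest)).flatMap (pvColChars letter) =
      if c.toNat ≤ letter.toNat ∧ letter.toNat < L.toNat then
        pvInterior (c :: rest) letter
      else
        pvColChars letter (pvRngC L.toNat 123 ++ pvRngC 97 start.toNat) := by
  induction rest with
  | nil =>
    intro c start letter L _ _ _ _ hlast
    simp only [List.getLast_singleton] at hlast
    subst hlast
    simp only [pvBuildCols, List.flatMap_cons, List.flatMap_nil, List.append_nil]
    rw [if_neg (by omega)]
  | cons d rest' ih =>
    intro c start letter L hp hle hsc hs127 hlast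
    have hcd : c < d := (List.pairwise_cons.mp hp).1 d List.mem_cons_self
    have hcdN : c.toNat < d.toNat := (pvCharLt c d).mp hcd
    have hp' : (d :: rest').Pairwise (· < ·) := (List.pairwise_cons.mp hp).2
    have hle' : ∀ x ∈ d :: rest', x.toNat ≤ 126 := fun x hx => hle x (List.mem_cons_of_mem _ hx)
    have hlast' : (d :: rest').getLast (by simp) = L := by
      rw [← hlast]
      exact (List.getLast_cons (show d :: rest' ≠ [] by simp)).symm
    have hdL : d.toNat ≤ L.toNat := by
      have hmem : L ∈ d :: rest' := hlast' ▸ List.getLast_mem (by simp)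
      rcases List.mem_cons.mp hmem with h | h
      · simp [h]
      · exact le_of_lt ((pvCharLt _ _).mp (List.rel_of_pairwise_cons hp' h))
    have hL126 : L.toNat ≤ 126 := hle' L (hlast' ▸ List.getLast_mem (by simp))
    simp only [pvBuildCols, List.flatMap_cons]
    rw [ih d start letter L hp' hle' (by omega) hs127 hlast']
    rw [pvColChars_rng c d letter (by have := hle' d List.mem_cons_self; omega) hcdN]
    by_cases h1 : c.toNat ≤ letter.toNat ∧ letter.toNat < d.toNat
    · rw [if_pos h1,
        if_neg (show ¬(d.toNat ≤ letter.toNat ∧ letter.toNat < L.toNat) from by omega),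
        pvColChars_last start L letter hs127 hL126 (by omega),
        if_neg (show ¬(L.toNat ≤ letter.toNat ∧ letter.toNat ≤ 122) from by omega),
        if_neg (show ¬(97 ≤ letter.toNat ∧ letter.toNat < start.toNat) from by omega),
        if_pos (show c.toNat ≤ letter.toNat ∧ letter.toNat < L.toNat from by omega)]
      rw [pvInterior_here c _ letter h1.1]
      · simp
      · intro x hx
        rcases List.mem_cons.mp hx with h | h
        · rw [h]
          omega
        · have := (pvCharLt d x).mp (List.rel_of_pairwise_cons hp' h)
          omega
    · rw [if_neg h1, List.nil_append]
      by_cases h2 : c.toNat ≤ letter.toNat ∧ letter.toNat < L.toNat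
      · rw [if_pos (show d.toNat ≤ letter.toNat ∧ letter.toNat < L.toNat from by omega),
          if_pos h2, pvInterior_skip c d rest' letter hp (by omega)]
      · rw [if_neg (show ¬(d.toNat ≤ letter.toNat ∧ letter.toNat < L.toNat) from by omega),
          if_neg h2]

theorem pvKey (c0 : Char) (rest : List Char) (letter : Char)
    (hp : (c0 :: rest).Pairwise (· < ·)) (hle : ∀ x ∈ c0 :: rest, x.toNat ≤ 126) :
    ((pvBuildCols c0 (c0 :: rest)).flatMap (pvColCode letter)).flatMap pvPf =
      pvEncodeC (c0 :: rest) c0 ((c0 :: rest).getLast (by simp)) letter := by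
  have hassoc : ((pvBuildCols c0 (c0 :: rest)).flatMap (pvColCode letter)).flatMap pvPf =
      (pvBuildCols c0 (c0 :: rest)).flatMap (pvColChars letter) :=
    List.flatMap_assoc
  have hc0 : c0.toNat ≤ 126 := hle c0 List.mem_cons_self
  have hL126 : ((c0 :: rest).getLast (by simp)).toNat ≤ 126 :=
    hle _ (List.getLast_mem (by simp))
  have hc0L : c0.toNat ≤ ((c0 :: rest).getLast (by simp)).toNat := by
    have hmem : (c0 :: rest).getLast (by simp) ∈ c0 :: rest := List.getLast_mem (by simp)
    rcases List.mem_cons.mp hmem with h | h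
    · simp [h]
    · exact le_of_lt ((pvCharLt _ _).mp (List.rel_of_pairwise_cons hp h))
  rw [hassoc, pvG rest c0 c0 letter _ hp hle le_rfl (by omega) rfl]
  by_cases h : c0.toNat ≤ letter.toNat ∧ letter.toNat < ((c0 :: rest).getLast (by simp)).toNat
  · rw [if_pos h]
    unfold pvEncodeC pvInterior
    rw [if_pos h]
  · rw [if_neg h, pvColChars_last c0 _ letter (by omega) hL126 hc0L]
    unfold pvEncodeC
    rw [if_neg h]

theorem pvEncode_bridge (sc : List Char) (lo hi ch : Char) :
    pvEncodeO sc lo hi (ch.toNat : Int) = pvEncodeC sc lo hi ch := by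
  unfold pvEncodeO pvEncodeC
  have hf : sc.filter (fun c => (c.toNat : Int) ≤ (ch.toNat : Int)) =
      sc.filter (fun c => c.toNat ≤ ch.toNat) := by
    refine List.filter_congr ?_
    intro c _
    simp only [decide_eq_decide]
    omega
  rw [hf]
  by_cases h1 : lo.toNat ≤ ch.toNat ∧ ch.toNat < hi.toNat
  · rw [if_pos (show (lo.toNat : Int) ≤ (ch.toNat : Int) ∧ (ch.toNat : Int) < (hi.toNat : Int) from by omega),
      if_pos h1]
  · rw [if_neg (show ¬((lo.toNat : Int) ≤ (ch.toNat : Int) ∧ (ch.toNat : Int) < (hi.toNat : Int)) from by omega),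
      if_neg h1]
    by_cases h2 : hi.toNat ≤ ch.toNat ∧ ch.toNat ≤ 122
    · rw [if_pos (show (hi.toNat : Int) ≤ (ch.toNat : Int) ∧ (ch.toNat : Int) ≤ 122 from by omega),
        if_pos h2]
    · rw [if_neg (show ¬((hi.toNat : Int) ≤ (ch.toNat : Int) ∧ (ch.toNat : Int) ≤ 122) from by omega),
        if_neg h2]
      by_cases h3 : 97 ≤ ch.toNat ∧ ch.toNat < lo.toNat
      · rw [if_pos (show (97 : Int) ≤ (ch.toNat : Int) ∧ (ch.toNat : Int) < (lo.toNat : Int) from by omega),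
        if_pos h3]
      · rw [if_neg (show ¬((97 : Int) ≤ (ch.toNat : Int) ∧ (ch.toNat : Int) < (lo.toNat : Int)) from by omega),
        if_neg h3]

-- looking a character up in the table built by Source B's loop gives its piece
theorem pvDictLookup (f : Int → List Char) (l : List Int) :
    ∀ (d0 : PySem.Dict Char (List Char)) (ch : Char),
    (∀ o ∈ l, 0 ≤ o ∧ o < 128) →
    PySem.Dict.getD (l.foldl (fun d o => PySem.Dict.insert d (pvChr o) (f o)) d0) ch [] =
      (if (ch.toNat : Int) ∈ l then f (ch.toNat : Int) else PySem.Dict.getD d0 ch []) := by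
  induction l using List.reverseRecOn with
  | nil => intro d0 ch _; simp
  | append_singleton l' o ih =>
    intro d0 ch hb
    rw [List.foldl_append, List.foldl_cons, List.foldl_nil, PySem.Dict.getD_insert]
    have ho := hb o (by simp)
    by_cases hc : ch = pvChr o
    · have he : (ch.toNat : Int) = o := by
        rw [hc]
        exact pvChr_toNat_eval o ho.1 (by omega)
      rw [if_pos hc, if_pos (by simp [he]), he]
    · have hno : (ch.toNat : Int) ≠ o := by
        intro he
        exact hc (by rw [← he, pvChr_toNat])
      rw [if_neg hc, ih d0 ch (fun x hx => hb x (by simp [hx]))]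
      by_cases hm : (ch.toNat : Int) ∈ l'
      · rw [if_pos hm, if_pos (by simp [hm])]
      · rw [if_neg hm, if_neg (by simp [hm, hno])]

theorem pvMain (code message : String)
    (hle0 : ∀ c ∈ code.toList, c.toNat ≤ 126)
    (hlem : ∀ c ∈ message.toList, c.toNat ≤ 126) :
    hamster_me code message = hamster_me_alt code message := by
  unfold hamster_me hamster_me_alt
  cases e : PySem.List.sorted (PySem.Set.ofList code.toList) (fun c => c) false with
  | nil => rfl
  | cons c0 rest =>
    have hp : (c0 :: rest).Pairwise (· < ·) :=
      e ▸ PySem.List.sorted_ofList_pairwise_lt code.toList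
    have hle : ∀ x ∈ c0 :: rest, x.toNat ≤ 126 := by
      intro x hx
      refine hle0 x ?_
      rw [← PySem.Set.mem_ofList code.toList x, ← PySem.List.mem_sorted _ (fun c => c) false x, e]
      exact hx
    simp only [PySem.List.foldl_append_eq_flatMap, List.nil_append]
    have hpf : (fun (t : Char × List Char) => t.1 :: t.2) = pvPf := rfl
    rw [hpf]
    congr 1
    rw [List.flatMap_assoc]
    refine List.flatMap_congr ?_
    intro letter hmem
    rw [pvDictLookup _ _ _ letter (fun o hov => by
        rw [PySem.List.mem_pyRange_one] at hov
        omega),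
      if_pos (by rw [PySem.List.mem_pyRange_one]; have := hlem letter hmem; omega),
      pvEncode_bridge]
    exact pvKey c0 rest letter hp hle

-- ===== VERDICT (by name: the statement is the Claim_ definition above) =====
theorem hamster_me_spec : Claim_equal_hamster_me := by
  unfold Claim_equal_hamster_me Spec_hamster_me
  intro code message hdom _
  unfold Dom_hamster_me pvDomStr at hdom
  simp only [Bool.and_eq_true, List.all_eq_true] at hdom
  have hb : ∀ (c : Char), pvDomChar c = true → c.toNat ≤ 126 := by
    intro c hd
    unfold pvDomChar at hd
    simp only [Bool.or_eq_true, Bool.and_eq_true, decide_eq_true_eq, beq_iff_eq] at hd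
    omega
  exact pvMain code message (fun c hc => hb c (hdom.1 c hc)) (fun c hc => hb c (hdom.2 c hc))
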